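-- pv_equiv track=rewrite | github.com/CrislyGonzalez/Python-basic | Tema Recursividad/numeroInLista.py | numeroAumentadoLista
-- ===== SOURCE A (Python) =====
-- def numeroAumentadoLista(lista,cantidad,num):
--     if lista==[]:
--         return []
--
--     elif lista[0]== num:
--         if(cantidad==0):
--             return numeroAumentadoLista(lista[1:],cantidad,num)
--         else:
--             return [num]+ numeroAumentadoLista(lista,cantidad-1,num)
--
--
--     else:
--         return [lista[0]]+ numeroAumentadoLista(lista[1:],cantidad,num)
-- ===== SOURCE B (Python) =====
-- def numeroAumentadoLista(lista, cantidad, num):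
--     result = []
--     c = cantidad
--     for x in lista:
--         if x == num:
--             result.extend([num] * c)
--             c = 0
--         else:
--             result.append(x)
--     return result
-- ===== Notes on version B (the rewrite author's own statement) =====
-- stated objective: faster
-- what changed: Replaces A's self-referencing recursion, whose [x]+rec prepends copy the tail at every step, by a single iterative pass keeping a remaining-copies counter spent at the first match and zeroed afterwards.
import Mathlib
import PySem

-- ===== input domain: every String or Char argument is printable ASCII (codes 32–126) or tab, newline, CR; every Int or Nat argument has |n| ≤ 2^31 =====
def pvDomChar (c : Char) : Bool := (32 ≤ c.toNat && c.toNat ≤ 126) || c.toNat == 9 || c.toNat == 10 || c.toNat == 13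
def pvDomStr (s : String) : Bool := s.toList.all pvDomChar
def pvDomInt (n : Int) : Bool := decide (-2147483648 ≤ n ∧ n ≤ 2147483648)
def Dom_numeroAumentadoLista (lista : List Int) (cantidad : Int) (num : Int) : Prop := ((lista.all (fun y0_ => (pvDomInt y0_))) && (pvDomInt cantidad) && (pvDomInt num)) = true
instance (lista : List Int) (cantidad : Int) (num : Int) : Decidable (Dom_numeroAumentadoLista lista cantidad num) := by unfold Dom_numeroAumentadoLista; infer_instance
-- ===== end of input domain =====

-- B replaces A's re-entrant recursion by one iterative pass with a remaining-copies counter (simpler).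

-- ===== PORT A =====
-- Literal transliteration of A's recursion. On cantidad < 0 with num present the
-- Python recurses forever; the `else []` guard only makes the Lean function total
-- there (that region is excluded by Pre_).
def numeroAumentadoLista (lista : List Int) (cantidad : Int) (num : Int) : List Int :=
  match lista with
  | [] => []
  | x :: rest =>
    if x = num then
      if cantidad = 0 then
        numeroAumentadoLista rest cantidad num
      else if 0 < cantidad then
        num :: numeroAumentadoLista (x :: rest) (cantidad - 1) num
      else []  -- Python diverges here (cantidad < 0); unreachable under Pre_
    else
      x :: numeroAumentadoLista rest cantidad num
termination_by lista.length + cantidad.toNat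
decreasing_by all_goals (simp only [List.length_cons]; omega)

-- ===== PORT B =====
-- Source B: one pass; state = (result, remaining copies c), extend at a match and zero c.
def numeroAumentadoLista_alt (lista : List Int) (cantidad : Int) (num : Int) : List Int :=
  (lista.foldl
    (fun (acc : List Int × Int) x =>
      if x = num then (acc.1 ++ List.replicate acc.2.toNat num, 0)
      else (acc.1 ++ [x], acc.2))
    ([], cantidad)).1

-- ===== PRECONDITION & SPEC =====
-- Pre_ excludes exactly the inputs where the Python A raises RecursionError: its
-- recursion depth is about lista.length plus (when num occurs) cantidad, so a
-- negative cantidad with num present recurses forever, and a depth beyond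
-- Python's stack limit (~1000; we use the safe bound 900) overflows.
def Pre_numeroAumentadoLista (lista : List Int) (cantidad : Int) (num : Int) : Prop :=
  lista.length ≤ 900 ∧ (num ∈ lista → 0 ≤ cantidad ∧ lista.length + cantidad.toNat ≤ 900)
instance (lista : List Int) (cantidad : Int) (num : Int) : Decidable (Pre_numeroAumentadoLista lista cantidad num) := by unfold Pre_numeroAumentadoLista; infer_instance
def pvWitness_numeroAumentadoLista : List Int × Int × Int := ([1, 2, 2, 3], 3, 2)

def Spec_numeroAumentadoLista (lista : List Int) (cantidad : Int) (num : Int) (out : List Int) : Prop := out = numeroAumentadoLista_alt lista cantidad num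
instance (lista : List Int) (cantidad : Int) (num : Int) (out : List Int) : Decidable (Spec_numeroAumentadoLista lista cantidad num out) := by unfold Spec_numeroAumentadoLista; infer_instance

-- ===== CLAIM (what is proved, stated in full; the proofs are below) =====
def Claim_equal_numeroAumentadoLista : Prop := ∀ (lista : List Int) (cantidad : Int) (num : Int), Dom_numeroAumentadoLista lista cantidad num → Pre_numeroAumentadoLista lista cantidad num → Spec_numeroAumentadoLista lista cantidad num (numeroAumentadoLista lista cantidad num)

-- ===== LEMMAS AND PROOFS =====

-- What both programs compute: expand the first occurrence of num into c copies,
-- drop every later occurrence, keep everything else.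
def expandSpec (lista : List Int) (c : Int) (num : Int) : List Int :=
  match lista with
  | [] => []
  | x :: rest =>
    if x = num then List.replicate c.toNat num ++ expandSpec rest 0 num
    else x :: expandSpec rest c num

theorem foldl_expand (num : Int) (lista : List Int) :
    ∀ (out : List Int) (c : Int),
    (lista.foldl
      (fun (acc : List Int × Int) x =>
        if x = num then (acc.1 ++ List.replicate acc.2.toNat num, 0)
        else (acc.1 ++ [x], acc.2))
      (out, c)).1 = out ++ expandSpec lista c num := by
  induction lista with
  | nil => intro out c; simp [expandSpec]
  | cons x rest ih =>
    intro out c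
    by_cases h : x = num <;> simp [List.foldl, expandSpec, h, ih]

theorem alt_eq_expand (lista : List Int) (cantidad num : Int) :
    numeroAumentadoLista_alt lista cantidad num = expandSpec lista cantidad num := by
  unfold numeroAumentadoLista_alt
  simpa using foldl_expand num lista [] cantidad

theorem a_eq_expand (num : Int) :
    ∀ (n : Nat) (lista : List Int) (c : Int), 0 ≤ c → lista.length + c.toNat ≤ n →
    numeroAumentadoLista lista c num = expandSpec lista c num := by
  intro n
  induction n with
  | zero =>
    intro lista c hc hn
    have : lista = [] := by cases lista <;> simp_all
    subst this; simp [numeroAumentadoLista, expandSpec]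
  | succ n ih =>
    intro lista c hc hn
    cases lista with
    | nil => simp [numeroAumentadoLista, expandSpec]
    | cons x rest =>
      by_cases hx : x = num
      · subst hx
        by_cases h0 : c = 0
        · subst h0
          rw [numeroAumentadoLista]
          rw [if_pos rfl, if_pos rfl]
          rw [ih rest 0 (le_refl 0) (by simp at hn ⊢; omega)]
          simp [expandSpec]
        · have hcpos : 0 < c := lt_of_le_of_ne hc (Ne.symm h0)
          rw [numeroAumentadoLista]
          rw [if_pos rfl, if_neg h0, if_pos hcpos]
          rw [ih (x :: rest) (c - 1) (by omega) (by simp at hn ⊢; omega)]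
          rw [expandSpec, expandSpec]
          rw [if_pos rfl]
          have : c.toNat = (c - 1).toNat + 1 := by omega
          rw [this, List.replicate_succ]
          simp
      · rw [numeroAumentadoLista]
        simp only [if_neg hx]
        rw [ih rest c hc (by simp at hn ⊢; omega)]
        simp [expandSpec, hx]

theorem a_eq_notmem (num : Int) :
    ∀ (lista : List Int) (c : Int), num ∉ lista →
    numeroAumentadoLista lista c num = lista := by
  intro lista
  induction lista with
  | nil => intro c _; simp [numeroAumentadoLista]
  | cons x rest ih =>
    intro c h
    simp only [List.mem_cons, not_or] at h
    have hx : ¬ x = num := fun e => h.1 e.symm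
    rw [numeroAumentadoLista]
    simp only [if_neg hx]
    rw [ih c h.2]

theorem expand_notmem (num : Int) :
    ∀ (lista : List Int) (c : Int), num ∉ lista →
    expandSpec lista c num = lista := by
  intro lista
  induction lista with
  | nil => intro c _; simp [expandSpec]
  | cons x rest ih =>
    intro c h
    simp only [List.mem_cons, not_or] at h
    have hx : ¬ x = num := fun e => h.1 e.symm
    rw [expandSpec]
    simp only [if_neg hx]
    rw [ih c h.2]

-- ===== VERDICT (by name: the statement is the Claim_ definition above) =====
theorem numeroAumentadoLista_spec : Claim_equal_numeroAumentadoLista := by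
  intro lista cantidad num _ hpre
  unfold Spec_numeroAumentadoLista
  rw [alt_eq_expand]
  by_cases hmem : num ∈ lista
  · exact a_eq_expand num (lista.length + cantidad.toNat) lista cantidad
      (hpre.2 hmem).1 (le_refl _)
  · rw [a_eq_notmem num lista cantidad hmem, expand_notmem num lista cantidad hmem]
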